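-- pv_equiv track=rewrite | github.com/ThomasLastName/Linear-Algebra-Without-Numpy | LinAlg3.py | FirstNonZero
-- ===== SOURCE A (Python) =====
-- def FirstNonZero(vector):
--     which = -1
--     for q in range(len(vector)):
--         if vector[q]==0:
--             which = which+1
--         else:
--             break
--     return which+1
-- ===== SOURCE B (Python) =====
-- def FirstNonZero(vector):
--     idxs = [i for i, v in enumerate(vector) if v != 0]
--     return min(idxs) if idxs else len(vector)
-- ===== Notes on version B (the rewrite author's own statement) =====
-- stated objective: alternative
-- what changed: Replaces A's count-leading-zeros loop with an early break by a full scan that materializes all nonzero positions via enumerate and reduces them with min (falling back to len on an empty index list).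
import Mathlib
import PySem

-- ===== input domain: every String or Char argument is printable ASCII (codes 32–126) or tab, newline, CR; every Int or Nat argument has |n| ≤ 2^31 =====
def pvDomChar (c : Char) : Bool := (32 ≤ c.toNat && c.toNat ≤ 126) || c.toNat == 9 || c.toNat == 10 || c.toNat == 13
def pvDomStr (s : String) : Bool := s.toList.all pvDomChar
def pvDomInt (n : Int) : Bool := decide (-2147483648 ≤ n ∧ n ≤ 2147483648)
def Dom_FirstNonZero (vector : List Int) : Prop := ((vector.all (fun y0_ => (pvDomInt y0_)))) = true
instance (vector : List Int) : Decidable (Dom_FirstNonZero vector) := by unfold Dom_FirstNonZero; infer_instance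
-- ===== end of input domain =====

-- B replaces A's count-leading-zeros loop (early break) by a materialize-all-nonzero-indices-then-min reduction; objective: alternative.

-- ===== PORT A =====
-- the 'for q in range(len(vector))' loop with its break, over the index list; which is the accumulator
def FirstNonZeroLoop (vector : List Int) (qs : List Int) (which : Int) : Int :=
  match qs with
  | [] => which
  | q :: rest =>
      if PySem.List.pyGetD vector q 0 = 0 then FirstNonZeroLoop vector rest (which + 1)
      else which

def FirstNonZero (vector : List Int) : Int :=
  FirstNonZeroLoop vector (PySem.List.pyRange 0 vector.length 1) (-1) + 1

-- ===== PORT B =====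
-- idxs = [i for i, v in enumerate(vector) if v != 0]
def NonZeroIdxs (vector : List Int) : List Int :=
  ((PySem.List.enumerate vector 0).filter (fun p => p.2 ≠ 0)).map (fun p => p.1)

-- min(idxs) if idxs else len(vector)
def FirstNonZero_alt (vector : List Int) : Int :=
  match PySem.List.min? (NonZeroIdxs vector) (fun x => x) with
  | some m => m
  | none => (vector.length : Int)

-- ===== PRECONDITION & SPEC =====
def Spec_FirstNonZero (vector : List Int) (out : Int) : Prop := out = FirstNonZero_alt vector
instance (vector : List Int) (out : Int) : Decidable (Spec_FirstNonZero vector out) := by unfold Spec_FirstNonZero; infer_instance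

-- ===== CLAIM (what is proved, stated in full; the proofs are below) =====
def Claim_equal_FirstNonZero : Prop := ∀ (vector : List Int), Dom_FirstNonZero vector → Spec_FirstNonZero vector (FirstNonZero vector)

-- ===== LEMMAS AND PROOFS =====

-- number of leading zeros: the common value of both programs
def clz : List Int → Int
  | [] => 0
  | x :: xs => if x = 0 then clz xs + 1 else 0

-- A's loop, started at offset pre.length, adds clz of the remaining suffix to the accumulator
theorem loopA_eq (suf : List Int) : ∀ (pre : List Int) (w : Int),
    FirstNonZeroLoop (pre ++ suf) (PySem.List.pyRange (pre.length : Int) ((pre ++ suf).length : Int) 1) w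
      = w + clz suf := by
  induction suf with
  | nil =>
      intro pre w
      simp only [List.append_nil]
      rw [PySem.List.pyRange_one_eq_nil (le_refl _)]
      simp [FirstNonZeroLoop, clz]
  | cons x xs ih =>
      intro pre w
      rw [PySem.List.pyRange_one_cons (by simp)]
      show (if PySem.List.pyGetD (pre ++ x :: xs) (pre.length : Int) 0 = 0 then _ else _) = _
      have hget : PySem.List.pyGetD (pre ++ x :: xs) (pre.length : Int) 0 = x := by
        rw [PySem.List.pyGetD_natCast]
        simp [List.getD]
      rw [hget]
      by_cases hx : x = 0
      · rw [if_pos hx]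
        have h1 : ((pre.length : Int) + 1) = ((pre ++ [x]).length : Int) := by simp
        have h2 : pre ++ x :: xs = (pre ++ [x]) ++ xs := by simp
        rw [h1, h2, ih (pre ++ [x]) (w + 1)]
        simp [clz, hx]; ring
      · rw [if_neg hx]
        simp [clz, hx]

theorem A_eq_clz (v : List Int) : FirstNonZero v = clz v := by
  unfold FirstNonZero
  have h := loopA_eq v [] (-1)
  simp only [List.nil_append, List.length_nil, Nat.cast_zero] at h
  rw [h]; ring

-- enumerate with shifted start = map (+1) of enumerate
theorem enumerate_shift (v : List Int) : ∀ s : Int,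
    PySem.List.enumerate v (s + 1) = (PySem.List.enumerate v s).map (fun p => (p.1 + 1, p.2)) := by
  induction v with
  | nil => intro s; simp [PySem.List.enumerate_nil]
  | cons x xs ih =>
      intro s
      rw [PySem.List.enumerate_cons, PySem.List.enumerate_cons, List.map_cons, ← ih (s + 1)]

theorem nonZeroIdxs_cons (x : Int) (xs : List Int) :
    NonZeroIdxs (x :: xs)
      = (if x ≠ 0 then [(0 : Int)] else []) ++ (NonZeroIdxs xs).map (fun i => i + 1) := by
  unfold NonZeroIdxs
  rw [PySem.List.enumerate_cons]
  rw [show (0 : Int) + 1 = 0 + 1 from rfl, enumerate_shift xs 0]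
  rw [List.filter_cons, List.filter_map, List.map_map]
  by_cases hx : x = 0 <;> simp [hx, Function.comp_def]

theorem mem_nonZeroIdxs_nonneg (v : List Int) : ∀ i ∈ NonZeroIdxs v, 0 ≤ i := by
  induction v with
  | nil => simp [NonZeroIdxs, PySem.List.enumerate_nil]
  | cons x xs ih =>
      intro i hi
      rw [nonZeroIdxs_cons] at hi
      rcases List.mem_append.1 hi with h | h
      · by_cases hx : x = 0 <;> simp [hx] at h; omega
      · obtain ⟨j, hj, rfl⟩ := List.mem_map.1 h
        have := ih j hj; omega

theorem foldl_min_of_le (t : List Int) : ∀ a : Int, (∀ y ∈ t, a ≤ y) → t.foldl min a = a := by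
  induction t with
  | nil => intro a _; rfl
  | cons y ys ih =>
      intro a h
      simp only [List.foldl_cons]
      rw [min_eq_left (h y (by simp))]
      exact ih a (fun z hz => h z (by simp [hz]))

theorem foldl_min_map_add_one (t : List Int) : ∀ a : Int,
    ((t.map (fun i => i + 1)).foldl min (a + 1)) = t.foldl min a + 1 := by
  induction t with
  | nil => intro a; rfl
  | cons y ys ih =>
      intro a
      simp only [List.map_cons, List.foldl_cons]
      rw [show min (a + 1) (y + 1) = min a y + 1 by omega]
      exact ih (min a y)

theorem B_eq_clz (v : List Int) : FirstNonZero_alt v = clz v := by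
  induction v with
  | nil =>
      simp [FirstNonZero_alt, NonZeroIdxs, PySem.List.enumerate_nil, PySem.List.min?, clz]
  | cons x xs ih =>
      by_cases hx : x = 0
      · subst hx
        unfold FirstNonZero_alt
        rw [nonZeroIdxs_cons]
        simp only [ne_eq, not_true_eq_false, List.nil_append, ite_false]
        cases hm : NonZeroIdxs xs with
        | nil =>
            have hB : FirstNonZero_alt xs = (xs.length : Int) := by
              unfold FirstNonZero_alt; rw [hm]; rfl
            have hlen : (xs.length : Int) = clz xs := by rw [← ih, hB]
            simp only [List.map_nil]
            show (((0:Int) :: xs).length : Int) = clz ((0:Int) :: xs)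
            simp [clz, ← hlen]
        | cons y t =>
            have hB : FirstNonZero_alt xs = t.foldl min y := by
              unfold FirstNonZero_alt
              rw [hm, PySem.List.min?_id_cons]
            simp only [List.map_cons]
            rw [PySem.List.min?_id_cons, foldl_min_map_add_one]
            simp [clz, ← ih, hB]
      · unfold FirstNonZero_alt
        rw [nonZeroIdxs_cons]
        simp only [hx, ne_eq, not_false_eq_true, if_pos, List.cons_append, List.nil_append]
        rw [PySem.List.min?_id_cons]
        rw [foldl_min_of_le _ 0 (by
          intro y hy
          obtain ⟨j, hj, rfl⟩ := List.mem_map.1 hy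
          have := mem_nonZeroIdxs_nonneg xs j hj; omega)]
        simp [clz, hx]

-- ===== VERDICT (by name: the statement is the Claim_ definition above) =====
theorem FirstNonZero_spec : Claim_equal_FirstNonZero := by
  intro v _
  show FirstNonZero v = FirstNonZero_alt v
  rw [A_eq_clz, B_eq_clz]
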